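-- pv_equiv track=rewrite | github.com/pypi-data/pypi-mirror-397 | packages/chuk-tool-processor/chuk_tool_processor-0.19.tar.gz/chuk_tool_processor-0.19/src/chuk_tool_processor/discovery/synonyms.py | detect_query_domain
-- ===== SOURCE A (Python) =====
-- QUERY_DOMAIN_PATTERNS: dict[str, set[str]] = {
--     "statistics": {
--         "risk",
--         "probability",
--         "stock",
--         "inventory",
--         "forecast",
--         "normal",
--         "gaussian",
--         "distribution",
--         "confidence",
--         "interval",
--         "hypothesis",
--         "significance",
--         "variance",
--         "deviation",
--         "mean",
--         "expected",
--         "random",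
--         "sample",
--     },
--     "number_theory": {
--         "prime",
--         "collatz",
--         "fibonacci",
--         "sequence",
--         "integer",
--         "divisibility",
--         "factorization",
--     },
-- }
--
-- def detect_query_domain(keywords: list[str]) -> str | None:
--     """Detect the likely domain of a query from its keywords.
--
--     Args:
--         keywords: List of keywords extracted from query
--
--     Returns:
--         Domain name if confidently detected, None otherwise.
--     """
--     keyword_set = {k.lower() for k in keywords}
--
--     best_domain = None
--     best_score = 0
--
--     for domain, patterns in QUERY_DOMAIN_PATTERNS.items():
--         overlap = keyword_set & patterns
--         if len(overlap) > best_score: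
--             best_score = len(overlap)
--             best_domain = domain
--
--     # Require at least 1 match to claim a domain
--     return best_domain if best_score >= 1 else None
-- ===== SOURCE B (Python) =====
-- QUERY_DOMAIN_PATTERNS: dict[str, set[str]] = {
--     "statistics": {
--         "risk", "probability", "stock", "inventory", "forecast", "normal",
--         "gaussian", "distribution", "confidence", "interval", "hypothesis",
--         "significance", "variance", "deviation", "mean", "expected",
--         "random", "sample",
--     },
--     "number_theory": {
--         "prime", "collatz", "fibonacci", "sequence", "integer",
--         "divisibility", "factorization",
--     },
-- }
--
-- # Inverted index: pattern keyword -> list of domains containing it (built once).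
-- _KEYWORD_INDEX: dict[str, list[str]] = {}
-- for _domain, _patterns in QUERY_DOMAIN_PATTERNS.items():
--     for _kw in _patterns:
--         _KEYWORD_INDEX.setdefault(_kw, []).append(_domain)
--
--
-- def detect_query_domain(keywords: list[str]) -> str | None:
--     """Detect the likely domain of a query from its keywords."""
--     counts: dict[str, int] = {}
--     for k in {k.lower() for k in keywords}:
--         for domain in _KEYWORD_INDEX.get(k, ()):
--             counts[domain] = counts.get(domain, 0) + 1
--
--     best_domain = None
--     best_score = 0
--     for domain in QUERY_DOMAIN_PATTERNS:
--         score = counts.get(domain, 0)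
--         if score > best_score:
--             best_score = score
--             best_domain = domain
--     return best_domain if best_score >= 1 else None
-- ===== Notes on version B (the rewrite author's own statement) =====
-- stated objective: alternative
-- what changed: Replaced A's per-domain set intersections with an inverted keyword-to-domains index built once from QUERY_DOMAIN_PATTERNS, plus a single counting pass over the deduplicated lowercased keywords before the same ordered strict-max selection.
import Mathlib
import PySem

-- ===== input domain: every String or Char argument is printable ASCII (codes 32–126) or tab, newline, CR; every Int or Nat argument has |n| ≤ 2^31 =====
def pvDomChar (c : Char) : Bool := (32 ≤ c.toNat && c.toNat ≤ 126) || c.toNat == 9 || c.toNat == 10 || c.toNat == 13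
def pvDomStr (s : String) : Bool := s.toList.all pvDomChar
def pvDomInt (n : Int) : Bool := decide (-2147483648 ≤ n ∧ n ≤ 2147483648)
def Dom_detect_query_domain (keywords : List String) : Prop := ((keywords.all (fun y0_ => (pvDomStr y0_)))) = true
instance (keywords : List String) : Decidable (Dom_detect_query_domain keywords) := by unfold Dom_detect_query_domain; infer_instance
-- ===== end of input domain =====

-- B replaces A's per-domain set intersections by an inverted keyword→domains index and a
-- single counting pass over the deduplicated lowercased keywords (objective: alternative).

-- ===== PORT A =====
-- the module constant QUERY_DOMAIN_PATTERNS (shared by both Pythons), in source order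
def pvStats : List String :=
  ["risk", "probability", "stock", "inventory", "forecast", "normal", "gaussian",
   "distribution", "confidence", "interval", "hypothesis", "significance", "variance",
   "deviation", "mean", "expected", "random", "sample"]
def pvNT : List String :=
  ["prime", "collatz", "fibonacci", "sequence", "integer", "divisibility", "factorization"]
def pvQueryDomainPatterns : List (String × PySem.Set String) :=
  [("statistics", PySem.Set.ofList pvStats), ("number_theory", PySem.Set.ofList pvNT)]

def detect_query_domain (keywords : List String) : Option String :=
  let keyword_set : PySem.Set String := PySem.Set.ofList (keywords.map PySem.Str.lower)
  let r :=
    pvQueryDomainPatterns.foldl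
      (fun (st : Option String × Int) dp =>
        let overlap := PySem.Set.inter keyword_set dp.2
        if PySem.Set.len overlap > st.2 then (some dp.1, PySem.Set.len overlap) else st)
      (none, 0)
  if r.2 ≥ 1 then r.1 else none

-- ===== PORT B =====
-- _KEYWORD_INDEX: inverted index built once from QUERY_DOMAIN_PATTERNS
def pvKeywordIndex : PySem.Dict String (List String) :=
  pvQueryDomainPatterns.foldl
    (fun idx dp => dp.2.foldl (fun idx kw => PySem.Dict.modify idx kw [] (fun l => l ++ [dp.1])) idx)
    PySem.Dict.empty

def detect_query_domain_alt (keywords : List String) : Option String :=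
  let counts : PySem.Dict String Int :=
    (PySem.Set.ofList (keywords.map PySem.Str.lower)).foldl
      (fun c k =>
        (PySem.Dict.getD pvKeywordIndex k []).foldl
          (fun c d => PySem.Dict.modify c d 0 (· + 1)) c)
      PySem.Dict.empty
  let r :=
    pvQueryDomainPatterns.foldl
      (fun (st : Option String × Int) dp =>
        let score := PySem.Dict.getD counts dp.1 0
        if score > st.2 then (some dp.1, score) else st)
      (none, 0)
  if r.2 ≥ 1 then r.1 else none

-- ===== PRECONDITION & SPEC =====
def Spec_detect_query_domain (keywords : List String) (out : Option String) : Prop := out = detect_query_domain_alt keywords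
instance (keywords : List String) (out : Option String) : Decidable (Spec_detect_query_domain keywords out) := by unfold Spec_detect_query_domain; infer_instance

-- ===== CLAIM (what is proved, stated in full; the proofs are below) =====
def Claim_equal_detect_query_domain : Prop := ∀ (keywords : List String), Dom_detect_query_domain keywords → Spec_detect_query_domain keywords (detect_query_domain keywords)

-- ===== LEMMAS AND PROOFS =====

-- the two pattern lists share no keyword
theorem stats_nt_disjoint (k : String) (h1 : pvStats.contains k = true) :
    pvNT.contains k = false := by
  simp only [pvStats, List.contains_eq_mem, List.mem_cons, List.not_mem_nil, or_false,
    decide_eq_true_eq] at h1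
  rcases h1 with h|h|h|h|h|h|h|h|h|h|h|h|h|h|h|h|h|h <;> subst h <;> decide

-- the inverted index, looked up at any key, is determined by membership in the two pattern lists
theorem keywordIndex_getD (k : String) :
    PySem.Dict.getD pvKeywordIndex k [] =
      if pvStats.contains k then ["statistics"]
      else if pvNT.contains k then ["number_theory"] else [] := by
  by_cases h1 : pvStats.contains k
  · simp only [h1, if_true]
    simp only [pvStats, List.contains_eq_mem, List.mem_cons, List.not_mem_nil, or_false,
      decide_eq_true_eq] at h1
    rcases h1 with h|h|h|h|h|h|h|h|h|h|h|h|h|h|h|h|h|h <;> subst h <;> rfl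
  · by_cases h2 : pvNT.contains k
    · simp only [h1, h2, if_true, if_false, Bool.false_eq_true]
      simp only [pvNT, List.contains_eq_mem, List.mem_cons, List.not_mem_nil, or_false,
        decide_eq_true_eq] at h2
      rcases h2 with h|h|h|h|h|h|h <;> subst h <;> rfl
    · simp only [h1, h2, if_false, Bool.false_eq_true]
      apply PySem.Dict.getD_of_not_contains
      simp only [Bool.eq_false_iff, ne_eq, PySem.Dict.contains_iff_mem_keys]
      have hkeys : PySem.Dict.keys pvKeywordIndex = pvStats ++ pvNT := by rfl
      rw [hkeys]
      intro hmem
      rcases List.mem_append.mp hmem with h | h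
      · exact h1 (by simpa [List.contains_eq_mem] using h)
      · exact h2 (by simpa [List.contains_eq_mem] using h)

-- each keyword votes once for a domain iff it lies in that domain's pattern list
theorem index_count (d : String) (pl : List String)
    (hd : (d = "statistics" ∧ pl = pvStats) ∨ (d = "number_theory" ∧ pl = pvNT)) (k : String) :
    (PySem.Dict.getD pvKeywordIndex k []).count d = if pl.contains k then 1 else 0 := by
  rw [keywordIndex_getD]
  by_cases h1 : pvStats.contains k
  · have h2 := stats_nt_disjoint k h1
    rcases hd with ⟨rfl, rfl⟩ | ⟨rfl, rfl⟩ <;>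
      simp_all [List.contains_eq_mem]
  · by_cases h2 : pvNT.contains k <;>
      rcases hd with ⟨rfl, rfl⟩ | ⟨rfl, rfl⟩ <;>
      simp_all [List.contains_eq_mem]

-- accumulated counts under the counting fold = number of matching keywords so far
theorem counts_getD (d : String) (pl : List String)
    (hd : (d = "statistics" ∧ pl = pvStats) ∨ (d = "number_theory" ∧ pl = pvNT))
    (l : List String) (c : PySem.Dict String Int) :
    PySem.Dict.getD
      (l.foldl (fun c k =>
        (PySem.Dict.getD pvKeywordIndex k []).foldl
          (fun c d => PySem.Dict.modify c d 0 (· + 1)) c) c) d 0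
    = PySem.Dict.getD c d 0 + ((l.filter (fun k => pl.contains k)).length : Int) := by
  induction l generalizing c with
  | nil => simp
  | cons k l ih =>
    rw [List.foldl_cons, ih, PySem.Dict.getD_foldl_modify_add_one, index_count d pl hd k,
      List.filter_cons]
    by_cases h : k ∈ pl <;> simp [h, List.contains_eq_mem] <;> omega

-- A's set intersection with a pattern set = filtering the deduped keywords by the pattern list
theorem inter_eq (S : List String) (xs : List String) :
    PySem.Set.inter S (PySem.Set.ofList xs) = S.filter (fun k => xs.contains k) := by
  simp only [PySem.Set.inter]
  apply List.filter_congr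
  intro x _
  rcases h : xs.contains x with _ | _
  · simp only [List.contains_eq_mem, decide_eq_false_iff_not] at h
    simp [PySem.Set.mem_ofList, h]
  · simp only [List.contains_eq_mem, decide_eq_true_eq] at h
    simp [PySem.Set.mem_ofList, h]

-- ===== VERDICT (by name: the statement is the Claim_ definition above) =====
theorem detect_query_domain_spec : Claim_equal_detect_query_domain := by
  intro keywords _
  unfold Spec_detect_query_domain detect_query_domain detect_query_domain_alt
  set S := PySem.Set.ofList (keywords.map PySem.Str.lower) with hS
  simp only [pvQueryDomainPatterns, List.foldl_cons, List.foldl_nil]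
  rw [counts_getD "statistics" pvStats (Or.inl ⟨rfl, rfl⟩),
    counts_getD "number_theory" pvNT (Or.inr ⟨rfl, rfl⟩)]
  simp [inter_eq, PySem.Dict.getD_empty]
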